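-- pv_equiv track=rewrite | github.com/AbstractMobius/PaperScan | PaperScan.py | _get_ioc
-- ===== SOURCE A (Python) =====
-- def _get_ioc(val):
--     ioc = {"Noun": ["NN", "NNS", "NNP", "NNPS"],
--            "Verb": ["VBZ", "RB", "RBR", "RBS",
--               "VBD", "VBG", "VBN", "VBP", "VBZ", "WRB"],
--            "Adjective": ["JJ", "JJR", "JJS"]}
--     for i in list(ioc.keys()):
--         if val in ioc[i]:
--             return True, i
--     return False, ""
-- ===== SOURCE B (Python) =====
-- _TABLE = {
--     "NN": "Noun", "NNS": "Noun", "NNP": "Noun", "NNPS": "Noun",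
--     "VBZ": "Verb", "RB": "Verb", "RBR": "Verb", "RBS": "Verb",
--     "VBD": "Verb", "VBG": "Verb", "VBN": "Verb", "VBP": "Verb", "WRB": "Verb",
--     "JJ": "Adjective", "JJR": "Adjective", "JJS": "Adjective",
-- }
--
-- def _get_ioc(val):
--     cat = _TABLE.get(val)
--     return (False, "") if cat is None else (True, cat)
-- ===== Notes on version B (the rewrite author's own statement) =====
-- stated objective: idiomatic
-- what changed: Replaced the loop over categories with per-list membership scans by one precomputed flat tag-to-category dictionary and a single lookup.
import Mathlib
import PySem

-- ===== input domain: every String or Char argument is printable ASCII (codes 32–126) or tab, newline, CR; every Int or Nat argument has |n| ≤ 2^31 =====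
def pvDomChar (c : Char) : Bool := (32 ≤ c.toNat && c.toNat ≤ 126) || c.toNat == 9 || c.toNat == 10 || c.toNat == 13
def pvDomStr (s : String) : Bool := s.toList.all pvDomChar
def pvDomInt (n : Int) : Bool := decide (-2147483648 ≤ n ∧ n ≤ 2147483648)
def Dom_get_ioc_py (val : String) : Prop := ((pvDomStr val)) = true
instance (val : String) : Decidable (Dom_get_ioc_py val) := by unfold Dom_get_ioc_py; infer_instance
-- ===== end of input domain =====

-- B replaces A's loop over categories with one flat tag→category table and a single lookup (idiomatic; same cost at this size).

-- ===== PORT A =====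
def pvIocA : PySem.Dict String (List String) :=
  PySem.Dict.ofList
    [("Noun", ["NN", "NNS", "NNP", "NNPS"]),
     ("Verb", ["VBZ", "RB", "RBR", "RBS", "VBD", "VBG", "VBN", "VBP", "VBZ", "WRB"]),
     ("Adjective", ["JJ", "JJR", "JJS"])]

-- the for-loop over list(ioc.keys()) with early return
def pvLoopA (val : String) : List String → Bool × String
  | [] => (false, "")
  | i :: rest =>
      if (pvIocA.getD i []).contains val then (true, i) else pvLoopA val rest

def get_ioc_py (val : String) : Bool × String := pvLoopA val pvIocA.keys

-- ===== PORT B =====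
def pvTableB : PySem.Dict String String :=
  PySem.Dict.ofList
    [("NN", "Noun"), ("NNS", "Noun"), ("NNP", "Noun"), ("NNPS", "Noun"),
     ("VBZ", "Verb"), ("RB", "Verb"), ("RBR", "Verb"), ("RBS", "Verb"),
     ("VBD", "Verb"), ("VBG", "Verb"), ("VBN", "Verb"), ("VBP", "Verb"), ("WRB", "Verb"),
     ("JJ", "Adjective"), ("JJR", "Adjective"), ("JJS", "Adjective")]

def get_ioc_py_alt (val : String) : Bool × String :=
  match pvTableB.get? val with
  | some c => (true, c)
  | none => (false, "")

-- ===== PRECONDITION & SPEC =====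
def Spec_get_ioc_py (val : String) (out : Bool × String) : Prop := out = get_ioc_py_alt val
instance (val : String) (out : Bool × String) : Decidable (Spec_get_ioc_py val out) := by unfold Spec_get_ioc_py; infer_instance

-- ===== CLAIM (what is proved, stated in full; the proofs are below) =====
def Claim_equal_get_ioc_py : Prop := ∀ (val : String), Dom_get_ioc_py val → Spec_get_ioc_py val (get_ioc_py val)

-- ===== LEMMAS AND PROOFS =====

-- ===== VERDICT (by name: the statement is the Claim_ definition above) =====
theorem get_ioc_py_spec : Claim_equal_get_ioc_py := by
  intro val _
  unfold Spec_get_ioc_py get_ioc_py get_ioc_py_alt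
  have hk : pvIocA.keys = ["Noun", "Verb", "Adjective"] := by decide
  have h1 : pvIocA.getD "Noun" [] = ["NN", "NNS", "NNP", "NNPS"] := by decide
  have h2 : pvIocA.getD "Verb" [] =
      ["VBZ", "RB", "RBR", "RBS", "VBD", "VBG", "VBN", "VBP", "VBZ", "WRB"] := by decide
  have h3 : pvIocA.getD "Adjective" [] = ["JJ", "JJR", "JJS"] := by decide
  have hb : pvTableB.items =
      [("NN", "Noun"), ("NNS", "Noun"), ("NNP", "Noun"), ("NNPS", "Noun"),
       ("VBZ", "Verb"), ("RB", "Verb"), ("RBR", "Verb"), ("RBS", "Verb"),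
       ("VBD", "Verb"), ("VBG", "Verb"), ("VBN", "Verb"), ("VBP", "Verb"), ("WRB", "Verb"),
       ("JJ", "Adjective"), ("JJR", "Adjective"), ("JJS", "Adjective")] := by decide
  simp [PySem.Dict.get?, hb, hk, pvLoopA, h1, h2, h3, List.find?]
  split_ifs with hN hV hJ
  all_goals try (rcases hN with rfl | rfl | rfl | rfl <;> rfl)
  all_goals try (rcases hV with rfl | rfl | rfl | rfl | rfl | rfl | rfl | rfl | rfl | rfl <;> rfl)
  all_goals try (rcases hJ with rfl | rfl | rfl <;> rfl)
  · push Not at hN hV hJ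
    obtain ⟨n1, n2, n3, n4⟩ := hN
    obtain ⟨v1, v2, v3, v4, v5, v6, v7, v8, v9, v10⟩ := hV
    obtain ⟨j1, j2, j3⟩ := hJ
    simp only [beq_eq_false_iff_ne.mpr (Ne.symm n1), beq_eq_false_iff_ne.mpr (Ne.symm n2),
      beq_eq_false_iff_ne.mpr (Ne.symm n3), beq_eq_false_iff_ne.mpr (Ne.symm n4),
      beq_eq_false_iff_ne.mpr (Ne.symm v1), beq_eq_false_iff_ne.mpr (Ne.symm v2),
      beq_eq_false_iff_ne.mpr (Ne.symm v3), beq_eq_false_iff_ne.mpr (Ne.symm v4),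
      beq_eq_false_iff_ne.mpr (Ne.symm v5), beq_eq_false_iff_ne.mpr (Ne.symm v6),
      beq_eq_false_iff_ne.mpr (Ne.symm v7), beq_eq_false_iff_ne.mpr (Ne.symm v8),
      beq_eq_false_iff_ne.mpr (Ne.symm v10),
      beq_eq_false_iff_ne.mpr (Ne.symm j1), beq_eq_false_iff_ne.mpr (Ne.symm j2),
      beq_eq_false_iff_ne.mpr (Ne.symm j3), Option.map_none]
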